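-- pv_equiv track=rewrite | github.com/almeidaitalo/ListaDeExerc-cios2 | Q2.py | padrao_ocorre
-- ===== SOURCE A (Python) =====
-- def padrao_ocorre(pattern: str, text: str) -> bool:
--     m = len(pattern)
--     n = len(text)
--
--     # DP[i][j] = True se pattern[:i] casa com text[:j]
--     DP = [[False] * (n + 1) for _ in range(m + 1)]
--     DP[0][0] = True
--
--     # Preencher primeira coluna (text vazio)
--     for i in range(1, m + 1):
--         if pattern[i - 1] == '#':
--             DP[i][0] = DP[i - 1][0]
--         else:
--             DP[i][0] = False
--
--     # Preencher o resto
--     for i in range(1, m + 1):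
--         for j in range(1, n + 1):
--             if pattern[i - 1] != '#':
--                 DP[i][j] = DP[i - 1][j - 1] and (pattern[i - 1] == text[j - 1])
--             else:
--                 # '#' pode casar com vazio OU comer mais um char do texto
--                 DP[i][j] = DP[i - 1][j] or DP[i][j - 1]
--
--     # Agora, checar se o padrão inteiro (i = m)
--     # casou com QUALQUER prefixo de text (j = 0..n)
--     for j in range(n + 1):
--         if DP[m][j]:
--             return True
--     return False
-- ===== SOURCE B (Python) =====
-- def padrao_ocorre(pattern: str, text: str) -> bool:
--     # Greedy: split the pattern on '#', anchor the first literal segment at the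
--     # start of text, then match each remaining segment at its earliest occurrence.
--     segments = pattern.split('#')
--     if not text.startswith(segments[0]):
--         return False
--     pos = len(segments[0])
--     for seg in segments[1:]:
--         i = text.find(seg, pos)
--         if i == -1:
--             return False
--         pos = i + len(seg)
--     return True
-- ===== Notes on version B (the rewrite author's own statement) =====
-- stated objective: faster
-- what changed: Replaces the (m+1)x(n+1) boolean DP table (nested loops plus a final row scan) by a greedy match: split the pattern on '#', anchor the first literal segment with startswith, then locate each remaining segment at its earliest occurrence with str.find.
import Mathlib
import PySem

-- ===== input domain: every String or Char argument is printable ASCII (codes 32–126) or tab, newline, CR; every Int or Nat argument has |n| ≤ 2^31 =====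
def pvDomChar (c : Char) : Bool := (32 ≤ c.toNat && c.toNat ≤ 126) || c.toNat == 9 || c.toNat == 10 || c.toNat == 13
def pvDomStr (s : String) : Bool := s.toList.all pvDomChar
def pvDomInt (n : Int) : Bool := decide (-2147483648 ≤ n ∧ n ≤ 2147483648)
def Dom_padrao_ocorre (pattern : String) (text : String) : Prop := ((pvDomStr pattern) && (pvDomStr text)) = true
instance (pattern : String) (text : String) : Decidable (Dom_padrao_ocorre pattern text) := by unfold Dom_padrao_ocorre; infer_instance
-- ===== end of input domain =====

-- B replaces A's (m+1)×(n+1) DP table by a greedy split-on-'#' match of literal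
-- segments at their earliest occurrences (objective: faster).

-- ===== PORT A =====
-- inner loop over j = 1..n of one row i: carries DP[i-1][j-1..], text[j-1..], and DP[i][j-1] (left)
def pvFillAux (c : Char) : List Bool → List Char → Bool → List Bool
  | pjm1 :: prest, x :: _xs, left =>
      let v := if c ≠ '#' then pjm1 && (c == x) else (prest.headD false || left)
      v :: pvFillAux c prest _xs v
  | _, _, _ => []

-- one row i: DP[i][0] from the first-column loop, then the j-loop
def pvFillRow (c : Char) (prev : List Bool) (ts : List Char) : List Bool :=
  let first := if c = '#' then prev.headD false else false
  first :: pvFillAux c prev ts first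

def padrao_ocorre (pattern : String) (text : String) : Bool :=
  let ts := text.toList
  let row0 : List Bool := true :: ts.map (fun _ => false)
  let last := pattern.toList.foldl (fun prev c => pvFillRow c prev ts) row0
  last.any id

-- ===== PORT B =====
-- for seg in segments[1:]: i = text.find(seg, pos); …
def pvFindLoop (ts : List Char) : Nat → List (List Char) → Bool
  | _, [] => true
  | pos, seg :: rest =>
      let i := PySem.Chars.findFrom ts seg (pos : Int) none
      if i = -1 then false else pvFindLoop ts (i.toNat + seg.length) rest

def padrao_ocorre_alt (pattern : String) (text : String) : Bool :=
  let segments := PySem.Chars.splitOn pattern.toList ['#']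
  match segments with
  | [] => false  -- unreachable: str.split never returns an empty list
  | s0 :: rest =>
      if PySem.Chars.startswith text.toList s0 then pvFindLoop text.toList s0.length rest
      else false

-- ===== PRECONDITION & SPEC =====
def Spec_padrao_ocorre (pattern : String) (text : String) (out : Bool) : Prop := out = padrao_ocorre_alt pattern text
instance (pattern : String) (text : String) (out : Bool) : Decidable (Spec_padrao_ocorre pattern text out) := by unfold Spec_padrao_ocorre; infer_instance

-- ===== CLAIM (what is proved, stated in full; the proofs are below) =====
def Claim_equal_padrao_ocorre : Prop := ∀ (pattern : String) (text : String), Dom_padrao_ocorre pattern text → Spec_padrao_ocorre pattern text (padrao_ocorre pattern text)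

-- ===== LEMMAS AND PROOFS =====

-- reference matcher: mex p s = "pattern p matches exactly the text s"
def mex : List Char → List Char → Bool
  | [], t => t.isEmpty
  | c :: ps, [] => if c = '#' then mex ps [] else false
  | c :: ps, x :: xs => if c = '#' then (mex ps (x :: xs) || mex (c :: ps) xs) else ((c == x) && mex ps xs)
termination_by p t => p.length + t.length

-- reference matcher: mpre p t = "pattern p matches some prefix of t"
def mpre : List Char → List Char → Bool
  | [], _ => true
  | c :: ps, [] => if c = '#' then mpre ps [] else false
  | c :: ps, x :: xs => if c = '#' then (mpre ps (x :: xs) || mpre (c :: ps) xs) else ((c == x) && mpre ps xs)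
termination_by p t => p.length + t.length

-- reference split of the pattern on '#'
def mySplit : List Char → List (List Char)
  | [] => [[]]
  | c :: l =>
      if c = '#' then [] :: mySplit l
      else match mySplit l with
           | [] => [[c]]
           | h :: t => (c :: h) :: t

def interAll : List (List Char) → List Char
  | [] => []
  | s :: rest => '#' :: (s ++ interAll rest)

def glue : List (List Char) → List Char
  | [] => []
  | s :: rest => s ++ interAll rest

-- ---- splitOn = mySplit ----
theorem mySplit_ne_nil (l : List Char) : mySplit l ≠ [] := by
  cases l with
  | nil => simp [mySplit]
  | cons c l =>
    simp only [mySplit]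
    split
    · simp
    · split <;> simp

theorem splitOn_go_eq (fuel : Nat) (l cur : List Char) (acc : List (List Char))
    (h : l.length < fuel) :
    PySem.Chars.splitOn.go ['#'] fuel l cur acc
      = acc.reverse ++ (mySplit l).modifyHead (cur.reverse ++ ·) := by
  induction fuel generalizing l cur acc with
  | zero => omega
  | succ f ih =>
    cases l with
    | nil =>
      rw [PySem.Chars.splitOn.go.eq_def]
      simp [mySplit]
    | cons c rest =>
      rw [PySem.Chars.splitOn.go.eq_def]
      simp only []
      by_cases hc : c = '#'
      · have hpre : List.isPrefixOf ['#'] (c :: rest) = true := by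
          subst hc; simp [List.isPrefixOf]
        subst hc
        rw [if_pos hpre]
        simp only [List.length_cons, List.drop_succ_cons, List.length_nil, List.drop_zero]
        rw [ih rest [] _ (by simp at h; omega)]
        have hne := mySplit_ne_nil rest
        cases hm : mySplit rest with
        | nil => exact absurd hm hne
        | cons a b => simp [mySplit, hm]
      · have hpre : List.isPrefixOf ['#'] (c :: rest) = false := by
          simp [List.isPrefixOf]; exact fun hh => (hc hh.symm).elim
        rw [if_neg (by simp [hpre])]
        rw [ih rest (c :: cur) acc (by simpa using Nat.lt_of_succ_lt_succ (by simpa using h))]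
        have hne := mySplit_ne_nil rest
        cases hm : mySplit rest with
        | nil => exact absurd hm hne
        | cons a b => simp [mySplit, hm, hc, List.append_assoc]

theorem splitOn_eq_mySplit (l : List Char) :
    PySem.Chars.splitOn l ['#'] = mySplit l := by
  unfold PySem.Chars.splitOn
  rw [splitOn_go_eq _ _ _ _ (by omega)]
  have hne := mySplit_ne_nil l
  cases hm : mySplit l with
  | nil => exact absurd hm hne
  | cons a b => simp

theorem glue_mySplit (l : List Char) : glue (mySplit l) = l := by
  induction l with
  | nil => simp [mySplit, glue, interAll]
  | cons c l ih =>
    simp only [mySplit]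
    by_cases hc : c = '#'
    · subst hc
      rw [if_pos rfl]
      cases hm : mySplit l with
      | nil => exact absurd hm (mySplit_ne_nil l)
      | cons a b =>
        rw [hm] at ih
        simp only [glue] at ih
        simp [glue, interAll, ih]
    · rw [if_neg hc]
      cases hm : mySplit l with
      | nil => exact absurd hm (mySplit_ne_nil l)
      | cons a b =>
        rw [hm] at ih
        simp only [glue] at ih ⊢
        simp [ih]

theorem mySplit_no_hash (l : List Char) : ∀ s ∈ mySplit l, ('#' : Char) ∉ s := by
  induction l with
  | nil => simp [mySplit]
  | cons c l ih =>
    simp only [mySplit]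
    by_cases hc : c = '#'
    · subst hc
      rw [if_pos rfl]
      intro s hs
      rcases List.mem_cons.mp hs with h | h
      · subst h; simp
      · exact ih s h
    · rw [if_neg hc]
      cases hm : mySplit l with
      | nil => exact absurd hm (mySplit_ne_nil l)
      | cons a b =>
        intro s hs
        rcases List.mem_cons.mp hs with h | h
        · subst h
          intro hmem
          rcases List.mem_cons.mp hmem with h | h
          · exact hc h.symm
          · exact ih a (by rw [hm]; exact List.mem_cons_self) h
        · exact ih s (by rw [hm]; exact List.mem_cons_of_mem a h)

-- ---- snoc lemmas for mex ----
theorem mex_snoc_lit_nil (q : List Char) (c : Char) (hc : c ≠ '#') :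
    mex (q ++ [c]) [] = false := by
  induction q with
  | nil => simp [mex, hc]
  | cons d q ih => simp [mex, ih]

theorem mex_snoc_hash_nil (q : List Char) :
    mex (q ++ ['#']) [] = mex q [] := by
  induction q with
  | nil => simp [mex]
  | cons d q ih => simp [mex, ih]

theorem mex_hash_singleton (t : List Char) : mex ['#'] t = true := by
  induction t with
  | nil => simp [mex]
  | cons x xs ih => simp [mex, ih]

theorem mex_snoc_lit (q : List Char) (c : Char) (hc : c ≠ '#') (s : List Char) (x : Char) :
    mex (q ++ [c]) (s ++ [x]) = (mex q s && (c == x)) := by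
  induction q generalizing s with
  | nil =>
    cases s with
    | nil => simp [mex, hc, Bool.and_comm]
    | cons y s => simp [mex, hc]
  | cons d q ih =>
    by_cases hd : d = '#'
    · subst hd
      induction s with
      | nil =>
        have h2 := mex_snoc_lit_nil ('#' :: q) c hc
        have h1 := ih (s := [])
        simp only [List.cons_append, List.nil_append] at h1 h2 ⊢
        simp [mex, h1, h2]
      | cons y s ihs =>
        have h1 := ih (s := y :: s)
        simp only [List.cons_append] at h1 ihs ⊢
        simp [mex, h1, ihs]
        try cases c == x <;> simp
    · cases s with
      | nil =>
        have h1 := ih (s := [])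
        simp only [List.nil_append] at h1
        simp [mex, hd, mex_snoc_lit_nil q c hc]
      | cons y s =>
        simp only [List.cons_append]
        simp [mex, hd, ih, Bool.and_assoc]

theorem mex_snoc_hash (q : List Char) (s : List Char) (x : Char) :
    mex (q ++ ['#']) (s ++ [x]) = (mex q (s ++ [x]) || mex (q ++ ['#']) s) := by
  induction q generalizing s with
  | nil => simp [mex, mex_hash_singleton]
  | cons d q ih =>
    by_cases hd : d = '#'
    · subst hd
      induction s with
      | nil =>
        have h1 := ih (s := [])
        simp only [List.cons_append, List.nil_append] at h1 ⊢
        simp [mex, h1, mex_snoc_hash_nil]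
      | cons y s ihs =>
        have h1 := ih (s := y :: s)
        simp only [List.cons_append] at h1 ihs ⊢
        simp [mex, h1, ihs]
        try cases mex q (y :: (s ++ [x])) <;> cases mex (q ++ ['#']) (y :: s) <;>
          cases mex ('#' :: q) (s ++ [x]) <;> cases mex ('#' :: ('#' :: q)) s <;> simp
    · cases s with
      | nil =>
        have h1 := ih (s := [])
        simp only [List.nil_append] at h1
        have h2 : mex (d :: (q ++ ['#'])) [] = false := by simp [mex, hd]
        simp [mex, hd, mex_snoc_hash_nil, h2]
      | cons y s =>
        simp only [List.cons_append]
        simp [mex, hd, ih]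
        try cases d == y <;> simp

-- ---- DP row invariant ----

theorem inits_map_cons {α β : Type} (l : List α) (f : List α → β) :
    l.inits.map f = f [] :: (l.inits.map f).tail := by
  cases l <;> simp

theorem inits_map_headD {α : Type} (l : List α) (f : List α → Bool) :
    (l.inits.map f).headD false = f [] := by
  rw [inits_map_cons]; rfl

theorem mex_hash_weaken (ps s : List Char) (h : mex ps s = true) : mex ('#' :: ps) s = true := by
  cases s <;> simp [mex, h]

theorem row0_eq (ts : List Char) :
    (true :: ts.map (fun _ => false)) = ts.inits.map (fun s => mex [] s) := by
  induction ts with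
  | nil => simp [mex]
  | cons x xs ih =>
    simp only [List.inits_cons, List.map_cons, List.map_map]
    have h1 : List.map ((fun s => mex [] s) ∘ fun t => x :: t) xs.inits
        = List.map (fun _ => false) xs.inits := by
      apply List.map_congr_left; intro s _; simp [mex]
    rw [h1, List.map_const', List.map_const', List.length_inits]
    simp [mex, List.replicate_succ]

theorem fillAux_eq (c : Char) (q : List Char) (u : List Char) (p : List Char) :
    pvFillAux c (u.inits.map (fun s => mex q (p ++ s))) u (mex (q ++ [c]) p)
      = (u.inits.map (fun s => mex (q ++ [c]) (p ++ s))).tail := by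
  induction u generalizing p with
  | nil => simp [pvFillAux]
  | cons x xs ih =>
    simp only [List.inits_cons, List.map_cons, List.map_map, List.append_nil, List.tail_cons]
    have e1 : xs.inits.map ((fun s => mex q (p ++ s)) ∘ fun t => x :: t)
        = xs.inits.map (fun s => mex q ((p ++ [x]) ++ s)) := by
      apply List.map_congr_left; intro s _; simp
    have e2 : xs.inits.map ((fun s => mex (q ++ [c]) (p ++ s)) ∘ fun t => x :: t)
        = xs.inits.map (fun s => mex (q ++ [c]) ((p ++ [x]) ++ s)) := by
      apply List.map_congr_left; intro s _; simp
    rw [e1, e2]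
    have hh : (xs.inits.map (fun s => mex q ((p ++ [x]) ++ s))).headD false = mex q (p ++ [x]) := by
      simpa using inits_map_headD xs (fun s => mex q ((p ++ [x]) ++ s))
    simp only [pvFillAux]
    have hv : (if c ≠ '#' then (mex q p && (c == x))
        else ((xs.inits.map (fun s => mex q ((p ++ [x]) ++ s))).headD false || mex (q ++ [c]) p))
        = mex (q ++ [c]) (p ++ [x]) := by
      by_cases hc : c = '#'
      · subst hc
        rw [if_neg (by simp), hh, ← mex_snoc_hash]
      · rw [if_pos hc, ← mex_snoc_lit q c hc p x]
    rw [hv]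
    rw [ih (p ++ [x])]
    rw [inits_map_cons xs (fun s => mex (q ++ [c]) ((p ++ [x]) ++ s))]
    simp

theorem fillRow_eq (c : Char) (q : List Char) (ts : List Char) :
    pvFillRow c (ts.inits.map (fun s => mex q s)) ts
      = ts.inits.map (fun s => mex (q ++ [c]) s) := by
  simp only [pvFillRow]
  have hh : (ts.inits.map (fun s => mex q s)).headD false = mex q [] := inits_map_headD ts _
  have hfirst : (if c = '#' then (ts.inits.map (fun s => mex q s)).headD false else false)
      = mex (q ++ [c]) [] := by
    by_cases hc : c = '#'
    · subst hc; rw [if_pos rfl, hh, mex_snoc_hash_nil]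
    · rw [if_neg hc, mex_snoc_lit_nil q c hc]
  rw [hfirst]
  have h2 := fillAux_eq c q ts []
  simp only [List.nil_append] at h2
  rw [h2]
  exact (inits_map_cons ts _).symm

theorem foldl_rows (rest q : List Char) (ts : List Char) :
    rest.foldl (fun prev c => pvFillRow c prev ts) (ts.inits.map (fun s => mex q s))
      = ts.inits.map (fun s => mex (q ++ rest) s) := by
  induction rest generalizing q with
  | nil => simp
  | cons c rest ih =>
    simp only [List.foldl_cons]
    rw [fillRow_eq, ih]
    simp

theorem padrao_ocorre_eq_any (pattern text : String) :
    padrao_ocorre pattern text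
      = (text.toList.inits.map (fun s => mex pattern.toList s)).any id := by
  unfold padrao_ocorre
  dsimp only
  rw [row0_eq, foldl_rows]
  simp

-- ---- mpre ↔ ∃ prefix with mex ----
theorem mpre_iff_exists (p t : List Char) :
    mpre p t = true ↔ ∃ s, s <+: t ∧ mex p s = true := by
  induction p generalizing t with
  | nil =>
    simp only [mpre]
    constructor
    · intro _; exact ⟨[], List.nil_prefix, by simp [mex]⟩
    · intro _; trivial
  | cons c ps ih =>
    by_cases hc : c = '#'
    · subst hc
      induction t with
      | nil =>
        rw [show mpre ('#' :: ps) [] = mpre ps [] by simp [mpre]]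
        rw [ih]
        constructor
        · rintro ⟨s, hs, hm⟩
          exact ⟨s, hs, mex_hash_weaken ps s hm⟩
        · rintro ⟨s, hs, hm⟩
          rcases List.prefix_nil.mp hs with rfl
          exact ⟨[], List.nil_prefix, by simpa [mex] using hm⟩
      | cons x xs iht =>
        rw [show mpre ('#' :: ps) (x :: xs) = (mpre ps (x :: xs) || mpre ('#' :: ps) xs) by
          simp [mpre]]
        constructor
        · intro h
          rw [Bool.or_eq_true] at h
          rcases h with h | h
          · rcases (ih (x :: xs)).mp h with ⟨s, hs, hm⟩
            exact ⟨s, hs, mex_hash_weaken ps s hm⟩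
          · rcases iht.mp h with ⟨s, hs, hm⟩
            exact ⟨x :: s, List.cons_prefix_cons.mpr ⟨rfl, hs⟩, by simp [mex, hm]⟩
        · rintro ⟨s, hs, hm⟩
          rw [Bool.or_eq_true]
          cases s with
          | nil =>
            left
            exact (ih (x :: xs)).mpr ⟨[], List.nil_prefix, by simpa [mex] using hm⟩
          | cons y s' =>
            obtain ⟨rfl, hs'⟩ := List.cons_prefix_cons.mp hs
            rw [show mex ('#' :: ps) (y :: s') = (mex ps (y :: s') || mex ('#' :: ps) s') by
              simp [mex]] at hm
            rw [Bool.or_eq_true] at hm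
            rcases hm with hm | hm
            · exact Or.inl ((ih (y :: xs)).mpr ⟨y :: s', List.cons_prefix_cons.mpr ⟨rfl, hs'⟩, hm⟩)
            · exact Or.inr (iht.mpr ⟨s', hs', hm⟩)
    · cases t with
      | nil =>
        rw [show mpre (c :: ps) [] = false by simp [mpre, hc]]
        constructor
        · intro h; exact absurd h (by simp)
        · rintro ⟨s, hs, hm⟩
          rcases List.prefix_nil.mp hs with rfl
          simp [mex, hc] at hm
      | cons x xs =>
        rw [show mpre (c :: ps) (x :: xs) = ((c == x) && mpre ps xs) by simp [mpre, hc]]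
        constructor
        · intro h
          rw [Bool.and_eq_true] at h
          obtain ⟨hcx, h2⟩ := h
          rcases (ih xs).mp h2 with ⟨s, hs, hm⟩
          refine ⟨x :: s, List.cons_prefix_cons.mpr ⟨rfl, hs⟩, ?_⟩
          simp [mex, hc, hm, hcx]
        · rintro ⟨s, hs, hm⟩
          cases s with
          | nil => simp [mex, hc] at hm
          | cons y s' =>
            obtain ⟨rfl, hs'⟩ := List.cons_prefix_cons.mp hs
            rw [show mex (c :: ps) (y :: s') = ((c == y) && mex ps s') by simp [mex, hc]] at hm
            rw [Bool.and_eq_true] at hm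
            rw [Bool.and_eq_true]
            exact ⟨hm.1, (ih xs).mpr ⟨s', hs', hm.2⟩⟩

-- ---- greedy side ----
theorem mpre_lit (lit : List Char) (hl : ('#' : Char) ∉ lit) (Q t : List Char) :
    mpre (lit ++ Q) t = (decide (lit <+: t) && mpre Q (t.drop lit.length)) := by
  induction lit generalizing t with
  | nil => simp
  | cons c lit ih =>
    have hc : c ≠ '#' := fun h => hl (by simp [h])
    have hl' : ('#' : Char) ∉ lit := fun h => hl (List.mem_cons_of_mem _ h)
    cases t with
    | nil => simp [mpre, hc]
    | cons x xs =>
      rw [show mpre (c :: lit ++ Q) (x :: xs) = ((c == x) && mpre (lit ++ Q) xs) by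
        simp [mpre, hc]]
      rw [ih hl']
      simp only [List.cons_prefix_cons, List.length_cons, List.drop_succ_cons]
      by_cases hx : c = x <;> simp [hx]

theorem mpre_hash_iff (P u : List Char) :
    mpre ('#' :: P) u = true ↔ ∃ k, mpre P (u.drop k) = true := by
  induction u with
  | nil =>
    rw [show mpre ('#' :: P) [] = mpre P [] by simp [mpre]]
    constructor
    · intro h; exact ⟨0, by simpa using h⟩
    · rintro ⟨k, hk⟩; simpa using hk
  | cons x xs ih =>
    rw [show mpre ('#' :: P) (x :: xs) = (mpre P (x :: xs) || mpre ('#' :: P) xs) by simp [mpre]]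
    constructor
    · intro h
      rw [Bool.or_eq_true] at h
      rcases h with h | h
      · exact ⟨0, by simpa using h⟩
      · rcases ih.mp h with ⟨k, hk⟩
        exact ⟨k + 1, by simpa using hk⟩
    · rintro ⟨k, hk⟩
      rw [Bool.or_eq_true]
      cases k with
      | zero => exact Or.inl (by simpa using hk)
      | succ k => exact Or.inr (ih.mpr ⟨k, by simpa using hk⟩)

theorem mpre_inter_cons (rest : List (List Char)) (x : Char) (v : List Char)
    (h : mpre (interAll rest) v = true) : mpre (interAll rest) (x :: v) = true := by
  cases rest with
  | nil => simp [interAll, mpre]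
  | cons r rs =>
    rw [show interAll (r :: rs) = '#' :: (r ++ interAll rs) from rfl] at h ⊢
    rw [show mpre ('#' :: (r ++ interAll rs)) (x :: v)
        = (mpre (r ++ interAll rs) (x :: v) || mpre ('#' :: (r ++ interAll rs)) v) by simp [mpre]]
    simp [h]

theorem mpre_inter_suffix (rest : List (List Char)) (v w : List Char)
    (hs : v <:+ w) (h : mpre (interAll rest) v = true) : mpre (interAll rest) w = true := by
  induction w with
  | nil =>
    rcases List.suffix_nil.mp hs with rfl
    exact h
  | cons x w ihw =>
    rcases List.suffix_cons_iff.mp hs with h1 | h1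
    · rw [← h1]; exact h
    · exact mpre_inter_cons rest x w (ihw h1)

theorem findLoop_eq (ts : List Char) (segs : List (List Char))
    (hh : ∀ s ∈ segs, ('#' : Char) ∉ s) :
    ∀ pos, pos ≤ ts.length →
      pvFindLoop ts pos segs = mpre (interAll segs) (ts.drop pos) := by
  induction segs with
  | nil => intro pos hpos; simp [pvFindLoop, interAll, mpre]
  | cons seg rest ih =>
    intro pos hpos
    have hrest : ∀ s ∈ rest, ('#' : Char) ∉ s := fun s hs => hh s (List.mem_cons_of_mem _ hs)
    have hseg : ('#' : Char) ∉ seg := hh seg List.mem_cons_self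
    simp only [pvFindLoop]
    rw [PySem.Chars.findFrom_natCast ts seg pos hpos]
    by_cases hf : PySem.Chars.find (ts.drop pos) seg = -1
    · rw [if_pos (by rw [if_pos hf])]
      cases hmp : mpre (interAll (seg :: rest)) (ts.drop pos) with
      | false => rfl
      | true =>
        exfalso
        rw [show interAll (seg :: rest) = '#' :: (seg ++ interAll rest) from rfl] at hmp
        rcases (mpre_hash_iff _ _).mp hmp with ⟨k, hk⟩
        rw [mpre_lit seg hseg, Bool.and_eq_true] at hk
        have hpre : seg <+: (ts.drop pos).drop k := of_decide_eq_true hk.1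
        have hinf : seg <:+: ts.drop pos :=
          hpre.isInfix.trans (List.drop_suffix k (ts.drop pos)).isInfix
        exact ((PySem.Chars.find_eq_neg_one_iff (s := ts.drop pos) (sub := seg)).mp hf) hinf
    · have hmone := PySem.Chars.neg_one_le_find (s := ts.drop pos) (sub := seg)
      have h0 : 0 ≤ PySem.Chars.find (ts.drop pos) seg := by omega
      set fI := PySem.Chars.find (ts.drop pos) seg with hfI
      set f := fI.toNat with hfdef
      have hne : ((pos : Int) + fI) ≠ -1 := by omega
      rw [if_neg (by rw [if_neg hf]; exact hne), if_neg hf]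
      have htoNat : ((pos : Int) + fI).toNat = pos + f := by omega
      rw [htoNat]
      obtain ⟨hocc, hmin⟩ := PySem.Chars.find_spec (s := ts.drop pos) (sub := seg) h0
      have hfle : f + seg.length ≤ (ts.drop pos).length := by
        have h1 := hocc.length_le
        have h2 := PySem.Chars.find_le_length (s := ts.drop pos) (sub := seg)
        simp only [List.length_drop] at h1 h2 ⊢
        omega
      have hlen2 : pos + f + seg.length ≤ ts.length := by
        have h3 : (ts.drop pos).length = ts.length - pos := List.length_drop
        omega
      rw [show pos + f + seg.length = (pos + f) + seg.length from rfl] at hlen2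
      rw [ih hrest ((pos + f) + seg.length) hlen2]
      have hdrops : ((ts.drop pos).drop f).drop seg.length = ts.drop ((pos + f) + seg.length) := by
        rw [List.drop_drop, List.drop_drop]
        congr 1
        omega
      cases hL : mpre (interAll rest) (ts.drop ((pos + f) + seg.length)) with
      | true =>
        symm
        rw [show interAll (seg :: rest) = '#' :: (seg ++ interAll rest) from rfl]
        apply (mpre_hash_iff _ _).mpr
        refine ⟨f, ?_⟩
        rw [mpre_lit seg hseg, Bool.and_eq_true]
        exact ⟨decide_eq_true hocc, by rw [hdrops]; exact hL⟩
      | false =>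
        cases hR : mpre (interAll (seg :: rest)) (ts.drop pos) with
        | false => rfl
        | true =>
          exfalso
          rw [show interAll (seg :: rest) = '#' :: (seg ++ interAll rest) from rfl] at hR
          rcases (mpre_hash_iff _ _).mp hR with ⟨k, hk⟩
          rw [mpre_lit seg hseg, Bool.and_eq_true] at hk
          obtain ⟨hkp, hkq⟩ := hk
          have hkpre : seg <+: (ts.drop pos).drop k := of_decide_eq_true hkp
          have hfk : f ≤ k := by
            by_contra hlt
            exact hmin k (by omega) hkpre
          have hsuf : ((ts.drop pos).drop k).drop seg.length <:+ ts.drop ((pos + f) + seg.length) := by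
            rw [List.drop_drop, List.drop_drop]
            rw [show pos + (k + seg.length) = ((pos + f) + seg.length) + (k - f) by omega]
            rw [← List.drop_drop]
            exact List.drop_suffix _ _
          have hcon := mpre_inter_suffix rest _ _ hsuf hkq
          rw [hL] at hcon
          exact Bool.false_ne_true hcon

theorem alt_eq_mpre (pattern text : String) :
    padrao_ocorre_alt pattern text = mpre pattern.toList text.toList := by
  unfold padrao_ocorre_alt
  dsimp only
  rw [splitOn_eq_mySplit]
  have hglue := glue_mySplit pattern.toList
  cases hm : mySplit pattern.toList with
  | nil => exact absurd hm (mySplit_ne_nil _)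
  | cons s0 rest =>
    rw [hm] at hglue
    simp only [glue] at hglue
    have hs0 : ('#' : Char) ∉ s0 :=
      mySplit_no_hash _ s0 (by rw [hm]; exact List.mem_cons_self)
    have hrest : ∀ s ∈ rest, ('#' : Char) ∉ s := fun s hs =>
      mySplit_no_hash _ s (by rw [hm]; exact List.mem_cons_of_mem _ hs)
    rw [← hglue, mpre_lit s0 hs0]
    dsimp only
    by_cases hsw : PySem.Chars.startswith text.toList s0 = true
    · rw [if_pos hsw]
      have hpre : s0 <+: text.toList := (PySem.Chars.startswith_iff _ _).mp hsw
      rw [findLoop_eq text.toList rest hrest s0.length hpre.length_le]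
      simp [hpre]
    · rw [if_neg hsw]
      have hnp : ¬ s0 <+: text.toList := fun h => hsw ((PySem.Chars.startswith_iff _ _).mpr h)
      simp [hnp]

-- ===== VERDICT (by name: the statement is the Claim_ definition above) =====
theorem padrao_ocorre_spec : Claim_equal_padrao_ocorre := by
  intro pattern text _
  unfold Spec_padrao_ocorre
  rw [alt_eq_mpre, padrao_ocorre_eq_any]
  have h2 : (((text.toList.inits.map (fun s => mex pattern.toList s)).any id) = true)
      ↔ ∃ s, s <+: text.toList ∧ mex pattern.toList s = true := by
    rw [List.any_map, List.any_eq_true]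
    simp [List.mem_inits]
  cases hb : mpre pattern.toList text.toList with
  | true => exact h2.mpr ((mpre_iff_exists _ _).mp hb)
  | false =>
    cases ha : (text.toList.inits.map (fun s => mex pattern.toList s)).any id with
    | false => rfl
    | true => exact absurd ((mpre_iff_exists _ _).mpr (h2.mp ha)) (by simp [hb])
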